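-- pv_equiv track=rewrite | github.com/AndersEnrico/Programmerings-Projekt-2 | Karakterafrundningsfunktion.py | roundGrade
-- ===== SOURCE A (Python) =====
-- def roundGrade(grades):
--     # laves in liste som de nye karaktere bliver sat ind i
--     gradesRounded = []
--     # afrunder hver karakter til den nærmste karakter på 7 trins skalaen
--     # og appender denne nye karakter i gradesRounded
--     for en_grade in grades:
--         if en_grade < -1.5:
--             gradesRounded.append(-3)
--         elif en_grade < 1:
--             gradesRounded.append(0)
--         elif en_grade < 3:
--             gradesRounded.append(2)
--         elif en_grade < 5.5:
--             gradesRounded.append(4)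
--         elif en_grade < 8.5:
--             gradesRounded.append(7)
--         elif en_grade < 11:
--             gradesRounded.append(10)
--         else:
--             gradesRounded.append(12)
--     return gradesRounded
-- ===== SOURCE B (Python) =====
-- # Table-driven rounding: binary search over doubled breakpoints instead of if/elif chain
-- _TH = [-3, 2, 6, 11, 17, 22]        # thresholds -1.5, 1, 3, 5.5, 8.5, 11 doubled (exact for int grades)
-- _VALS = [-3, 0, 2, 4, 7, 10, 12]
--
-- def roundGrade(grades):
--     out = []
--     for g in grades:
--         x = 2 * g
--         lo, hi = 0, len(_TH)
--         while lo < hi:                # bisect_right: strict '<' matches A's strict branches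
--             mid = (lo + hi) // 2
--             if x < _TH[mid]:
--                 hi = mid
--             else:
--                 lo = mid + 1
--         out.append(_VALS[lo])
--     return out
-- ===== Notes on version B (the rewrite author's own statement) =====
-- stated objective: alternative
-- what changed: Replaced the six-way if/elif comparison chain with a fixed breakpoint table (thresholds doubled to stay in integers) and a hand-rolled bisect_right binary search indexing a parallel value list.
import Mathlib
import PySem

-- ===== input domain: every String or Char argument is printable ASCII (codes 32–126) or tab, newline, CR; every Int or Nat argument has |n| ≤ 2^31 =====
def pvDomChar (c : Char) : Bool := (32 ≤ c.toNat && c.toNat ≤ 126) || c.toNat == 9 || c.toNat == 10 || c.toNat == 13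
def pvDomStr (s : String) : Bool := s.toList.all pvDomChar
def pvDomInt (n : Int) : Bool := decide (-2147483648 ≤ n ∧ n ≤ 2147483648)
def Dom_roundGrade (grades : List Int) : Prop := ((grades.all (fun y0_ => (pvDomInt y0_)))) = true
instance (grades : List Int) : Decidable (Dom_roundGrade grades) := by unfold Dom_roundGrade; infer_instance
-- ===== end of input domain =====

-- B replaces A's if/elif ladder by a binary search over a fixed breakpoint table (alternative decomposition, same cost).


-- ===== PORT A =====
-- A compares int grades against half-integer floats; on Int inputs 'g < 5.5' is exactly '2*g < 11' etc.
def roundGrade (grades : List Int) : List Int :=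
  grades.foldl (fun gradesRounded en_grade =>
    if 2 * en_grade < -3 then gradesRounded ++ [-3]
    else if en_grade < 1 then gradesRounded ++ [0]
    else if en_grade < 3 then gradesRounded ++ [2]
    else if 2 * en_grade < 11 then gradesRounded ++ [4]
    else if 2 * en_grade < 17 then gradesRounded ++ [7]
    else if en_grade < 11 then gradesRounded ++ [10]
    else gradesRounded ++ [12]) []

-- ===== PORT B =====
def pvTH : List Int := [-3, 2, 6, 11, 17, 22]
def pvVALS : List Int := [-3, 0, 2, 4, 7, 10, 12]

-- bisect_right-style binary search (the while-loop of Source B)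
def pvBisect (x : Int) (lo hi : Nat) : Nat :=
  if _h : lo < hi then
    let mid := (lo + hi) / 2
    if x < pvTH.getD mid 0 then pvBisect x lo mid else pvBisect x (mid + 1) hi
  else lo
termination_by hi - lo
decreasing_by all_goals omega

def roundGrade_alt (grades : List Int) : List Int :=
  grades.foldl (fun out g => out ++ [pvVALS.getD (pvBisect (2 * g) 0 pvTH.length) 0]) []

-- ===== PRECONDITION & SPEC =====
def Spec_roundGrade (grades : List Int) (out : List Int) : Prop := out = roundGrade_alt grades
instance (grades : List Int) (out : List Int) : Decidable (Spec_roundGrade grades out) := by unfold Spec_roundGrade; infer_instance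

-- ===== CLAIM (what is proved, stated in full; the proofs are below) =====
def Claim_equal_roundGrade : Prop := ∀ (grades : List Int), Dom_roundGrade grades → Spec_roundGrade grades (roundGrade grades)

-- ===== LEMMAS AND PROOFS =====

-- the binary search over the 6-entry table, fully unfolded
theorem pvBisect_eval (x : Int) :
    pvBisect x 0 pvTH.length =
      if x < -3 then 0 else if x < 2 then 1 else if x < 6 then 2
      else if x < 11 then 3 else if x < 17 then 4 else if x < 22 then 5 else 6 := by
  simp only [pvTH]
  rw [pvBisect]; simp only [pvTH]
  norm_num
  split_ifs with h1 h2 h3 h4 h5 h6 <;>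
    repeat (first
      | rfl
      | (rw [pvBisect]; simp only [pvTH]; norm_num)
      | (split_ifs <;> first | rfl | omega))

theorem elem_eq (g : Int) :
    (if 2 * g < -3 then (-3 : Int) else if g < 1 then 0 else if g < 3 then 2
     else if 2 * g < 11 then 4 else if 2 * g < 17 then 7 else if g < 11 then 10 else 12)
    = pvVALS.getD (pvBisect (2 * g) 0 pvTH.length) 0 := by
  rw [pvBisect_eval]
  simp only [pvVALS]
  split_ifs <;> first | rfl | omega

theorem fold_eq (grades : List Int) (acc : List Int) :
    grades.foldl (fun gradesRounded en_grade =>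
      if 2 * en_grade < -3 then gradesRounded ++ [-3]
      else if en_grade < 1 then gradesRounded ++ [0]
      else if en_grade < 3 then gradesRounded ++ [2]
      else if 2 * en_grade < 11 then gradesRounded ++ [4]
      else if 2 * en_grade < 17 then gradesRounded ++ [7]
      else if en_grade < 11 then gradesRounded ++ [10]
      else gradesRounded ++ [12]) acc
    = grades.foldl (fun out g => out ++ [pvVALS.getD (pvBisect (2 * g) 0 pvTH.length) 0]) acc := by
  induction grades generalizing acc with
  | nil => rfl
  | cons g gs ih =>
    simp only [List.foldl]
    rw [← ih]
    congr 1
    rw [← elem_eq g]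
    split_ifs <;> rfl

-- ===== VERDICT (by name: the statement is the Claim_ definition above) =====
theorem roundGrade_spec : Claim_equal_roundGrade := by
  intro grades _
  unfold Spec_roundGrade roundGrade roundGrade_alt
  exact fold_eq grades []
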